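-- pv_equiv track=rewrite | github.com/hh2010/metis_hasan | projects/02-comps/data.py | sic_format
-- ===== SOURCE A (Python) =====
-- def sic_format(n):
--     sic_map = {(100, 999): 1, (1000, 1499): 2, (1500, 1799): 3, (1800, 1999): 4,
--                (2000, 3999): 5, (4000, 4999): 6, (5000, 5199): 7, (5200, 5999): 8,
--                (6000, 6799): 9, (7000, 8999): 10, (9100, 9729): 11, (9900, 9999): 12}
--     for key, val in sic_map.items():
--         if all([n>=key[0], n<=key[1]]):
--             return val
--     return 12
-- ===== SOURCE B (Python) =====
-- import bisect
--
-- _LOWERS = [100, 1000, 1500, 1800, 2000, 4000, 5000, 5200, 6000, 7000, 9100, 9900]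
-- _UPPERS = [999, 1499, 1799, 1999, 3999, 4999, 5199, 5999, 6799, 8999, 9729, 9999]
-- _VALUES = [1, 2, 3, 4, 5, 6, 7, 8, 9, 10, 11, 12]
--
-- def sic_format(n):
--     idx = bisect.bisect_right(_LOWERS, n) - 1
--     if idx >= 0 and n <= _UPPERS[idx]:
--         return _VALUES[idx]
--     return 12
-- ===== Notes on version B (the rewrite author's own statement) =====
-- stated objective: idiomatic
-- what changed: Replaced the linear scan over a dict of (low, high) range keys by a binary-search (bisect_right) lookup into parallel sorted lower/upper/value arrays, falling through to the default bucket value when no bucket matches.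
import Mathlib
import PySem

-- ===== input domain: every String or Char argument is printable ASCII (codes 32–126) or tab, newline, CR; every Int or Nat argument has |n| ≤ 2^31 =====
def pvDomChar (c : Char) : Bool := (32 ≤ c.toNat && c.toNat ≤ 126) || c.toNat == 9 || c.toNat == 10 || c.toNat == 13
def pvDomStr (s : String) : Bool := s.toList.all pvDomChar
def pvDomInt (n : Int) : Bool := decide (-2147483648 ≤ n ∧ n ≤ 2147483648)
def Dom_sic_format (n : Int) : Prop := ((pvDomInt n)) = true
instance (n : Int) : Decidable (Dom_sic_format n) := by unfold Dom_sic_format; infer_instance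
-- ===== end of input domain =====

-- B replaces A's linear scan over range-keyed dict items by a bisect_right binary search
-- into parallel sorted lower/upper/value arrays (objective: idiomatic).


-- ===== PORT A =====
-- the dict literal, as its insertion-ordered item list
def sicMapA : List ((Int × Int) × Int) :=
  [((100, 999), 1), ((1000, 1499), 2), ((1500, 1799), 3), ((1800, 1999), 4),
   ((2000, 3999), 5), ((4000, 4999), 6), ((5000, 5199), 7), ((5200, 5999), 8),
   ((6000, 6799), 9), ((7000, 8999), 10), ((9100, 9729), 11), ((9900, 9999), 12)]

-- the 'for key, val in sic_map.items(): if all([n>=key[0], n<=key[1]]): return val' loop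
def sicLoopA (n : Int) : List ((Int × Int) × Int) → Int
  | [] => 12
  | (key, val) :: rest =>
    if n ≥ key.1 && n ≤ key.2 then val else sicLoopA n rest

def sic_format (n : Int) : Int := sicLoopA n sicMapA

-- ===== PORT B =====
def sicLowers : List Int := [100, 1000, 1500, 1800, 2000, 4000, 5000, 5200, 6000, 7000, 9100, 9900]
def sicUppers : List Int := [999, 1499, 1799, 1999, 3999, 4999, 5199, 5999, 6799, 8999, 9729, 9999]
def sicValues : List Int := [1, 2, 3, 4, 5, 6, 7, 8, 9, 10, 11, 12]

-- bisect.bisect_right: binary search, CPython's 'while lo < hi' loop as fuel recursion (fuel = len suffices)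
def bisectRightLoop (a : List Int) (x : Int) : Nat → Nat → Nat → Nat
  | 0, lo, _ => lo
  | fuel + 1, lo, hi =>
    if lo < hi then
      let mid := (lo + hi) / 2
      if x < a.getD mid 0 then bisectRightLoop a x fuel lo mid
      else bisectRightLoop a x fuel (mid + 1) hi
    else lo

def bisectRight (a : List Int) (x : Int) : Nat :=
  bisectRightLoop a x a.length 0 a.length

def sic_format_alt (n : Int) : Int :=
  let idx : Int := (bisectRight sicLowers n : Int) - 1
  if idx ≥ 0 && n ≤ sicUppers.getD idx.toNat 0 then sicValues.getD idx.toNat 0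
  else 12

-- ===== PRECONDITION & SPEC =====
def Spec_sic_format (n : Int) (out : Int) : Prop := out = sic_format_alt n
instance (n : Int) (out : Int) : Decidable (Spec_sic_format n out) := by unfold Spec_sic_format; infer_instance

-- ===== CLAIM (what is proved, stated in full; the proofs are below) =====
def Claim_equal_sic_format : Prop := ∀ (n : Int), Dom_sic_format n → Spec_sic_format n (sic_format n)

-- ===== LEMMAS AND PROOFS =====

-- one step / end of port A's scan loop
theorem sicLoopA_nil (n : Int) : sicLoopA n [] = 12 := rfl
theorem sicLoopA_cons (n k1 k2 v : Int) (rest : List ((Int × Int) × Int)) :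
    sicLoopA n (((k1, k2), v) :: rest) = if n ≥ k1 && n ≤ k2 then v else sicLoopA n rest := rfl

theorem bnd_true (n a b : Int) (h : a ≤ n ∧ n ≤ b) : (n ≥ a && n ≤ b) = true := by
  simp only [Bool.and_eq_true, decide_eq_true_eq, ge_iff_le]; exact h
theorem bnd_false (n a b : Int) (h : ¬ (a ≤ n ∧ n ≤ b)) : ¬ ((n ≥ a && n ≤ b) = true) := by
  simp only [Bool.and_eq_true, decide_eq_true_eq, ge_iff_le]; exact h

-- closed-form evaluation of the binary search on the concrete lower-bound table
set_option maxHeartbeats 2000000 in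
theorem bis_char (n : Int) : bisectRight sicLowers n =
    if n < 100 then 0 else if n < 1000 then 1 else if n < 1500 then 2 else if n < 1800 then 3
    else if n < 2000 then 4 else if n < 4000 then 5 else if n < 5000 then 6 else if n < 5200 then 7
    else if n < 6000 then 8 else if n < 7000 then 9 else if n < 9100 then 10 else if n < 9900 then 11
    else 12 := by
  simp [bisectRight, bisectRightLoop, sicLowers]
  split_ifs <;> omega

-- ===== VERDICT (by name: the statement is the Claim_ definition above) =====
set_option maxHeartbeats 1000000 in
theorem sic_format_spec : Claim_equal_sic_format := by
  intro n _
  unfold Spec_sic_format sic_format_alt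
  rw [bis_char]
  simp only [sic_format, sicMapA, sicLoopA_cons, sicLoopA_nil]
  by_cases h0 : n < 100
  · rw [if_neg (bnd_false n 100 999 (by omega))]
    rw [if_neg (bnd_false n 1000 1499 (by omega))]
    rw [if_neg (bnd_false n 1500 1799 (by omega))]
    rw [if_neg (bnd_false n 1800 1999 (by omega))]
    rw [if_neg (bnd_false n 2000 3999 (by omega))]
    rw [if_neg (bnd_false n 4000 4999 (by omega))]
    rw [if_neg (bnd_false n 5000 5199 (by omega))]
    rw [if_neg (bnd_false n 5200 5999 (by omega))]
    rw [if_neg (bnd_false n 6000 6799 (by omega))]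
    rw [if_neg (bnd_false n 7000 8999 (by omega))]
    rw [if_neg (bnd_false n 9100 9729 (by omega))]
    rw [if_neg (bnd_false n 9900 9999 (by omega))]
    rw [if_pos (show n < 100 by omega)]
    norm_num
  by_cases h1 : n ≤ 999
  · rw [if_pos (bnd_true n 100 999 (by omega))]
    rw [if_neg (show ¬ n < 100 by omega)]
    rw [if_pos (show n < 1000 by omega)]
    norm_num [sicUppers, sicValues, show Int.toNat 0 = 0 from rfl]
    all_goals omega
  by_cases h2 : n ≤ 1499
  · rw [if_neg (bnd_false n 100 999 (by omega))]
    rw [if_pos (bnd_true n 1000 1499 (by omega))]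
    rw [if_neg (show ¬ n < 100 by omega)]
    rw [if_neg (show ¬ n < 1000 by omega)]
    rw [if_pos (show n < 1500 by omega)]
    norm_num [sicUppers, sicValues, show Int.toNat 1 = 1 from rfl]
    all_goals omega
  by_cases h3 : n ≤ 1799
  · rw [if_neg (bnd_false n 100 999 (by omega))]
    rw [if_neg (bnd_false n 1000 1499 (by omega))]
    rw [if_pos (bnd_true n 1500 1799 (by omega))]
    rw [if_neg (show ¬ n < 100 by omega)]
    rw [if_neg (show ¬ n < 1000 by omega)]
    rw [if_neg (show ¬ n < 1500 by omega)]
    rw [if_pos (show n < 1800 by omega)]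
    norm_num [sicUppers, sicValues, show Int.toNat 2 = 2 from rfl]
    all_goals omega
  by_cases h4 : n ≤ 1999
  · rw [if_neg (bnd_false n 100 999 (by omega))]
    rw [if_neg (bnd_false n 1000 1499 (by omega))]
    rw [if_neg (bnd_false n 1500 1799 (by omega))]
    rw [if_pos (bnd_true n 1800 1999 (by omega))]
    rw [if_neg (show ¬ n < 100 by omega)]
    rw [if_neg (show ¬ n < 1000 by omega)]
    rw [if_neg (show ¬ n < 1500 by omega)]
    rw [if_neg (show ¬ n < 1800 by omega)]
    rw [if_pos (show n < 2000 by omega)]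
    norm_num [sicUppers, sicValues, show Int.toNat 3 = 3 from rfl]
    all_goals omega
  by_cases h5 : n ≤ 3999
  · rw [if_neg (bnd_false n 100 999 (by omega))]
    rw [if_neg (bnd_false n 1000 1499 (by omega))]
    rw [if_neg (bnd_false n 1500 1799 (by omega))]
    rw [if_neg (bnd_false n 1800 1999 (by omega))]
    rw [if_pos (bnd_true n 2000 3999 (by omega))]
    rw [if_neg (show ¬ n < 100 by omega)]
    rw [if_neg (show ¬ n < 1000 by omega)]
    rw [if_neg (show ¬ n < 1500 by omega)]
    rw [if_neg (show ¬ n < 1800 by omega)]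
    rw [if_neg (show ¬ n < 2000 by omega)]
    rw [if_pos (show n < 4000 by omega)]
    norm_num [sicUppers, sicValues, show Int.toNat 4 = 4 from rfl]
    all_goals omega
  by_cases h6 : n ≤ 4999
  · rw [if_neg (bnd_false n 100 999 (by omega))]
    rw [if_neg (bnd_false n 1000 1499 (by omega))]
    rw [if_neg (bnd_false n 1500 1799 (by omega))]
    rw [if_neg (bnd_false n 1800 1999 (by omega))]
    rw [if_neg (bnd_false n 2000 3999 (by omega))]
    rw [if_pos (bnd_true n 4000 4999 (by omega))]
    rw [if_neg (show ¬ n < 100 by omega)]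
    rw [if_neg (show ¬ n < 1000 by omega)]
    rw [if_neg (show ¬ n < 1500 by omega)]
    rw [if_neg (show ¬ n < 1800 by omega)]
    rw [if_neg (show ¬ n < 2000 by omega)]
    rw [if_neg (show ¬ n < 4000 by omega)]
    rw [if_pos (show n < 5000 by omega)]
    norm_num [sicUppers, sicValues, show Int.toNat 5 = 5 from rfl]
    all_goals omega
  by_cases h7 : n ≤ 5199
  · rw [if_neg (bnd_false n 100 999 (by omega))]
    rw [if_neg (bnd_false n 1000 1499 (by omega))]
    rw [if_neg (bnd_false n 1500 1799 (by omega))]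
    rw [if_neg (bnd_false n 1800 1999 (by omega))]
    rw [if_neg (bnd_false n 2000 3999 (by omega))]
    rw [if_neg (bnd_false n 4000 4999 (by omega))]
    rw [if_pos (bnd_true n 5000 5199 (by omega))]
    rw [if_neg (show ¬ n < 100 by omega)]
    rw [if_neg (show ¬ n < 1000 by omega)]
    rw [if_neg (show ¬ n < 1500 by omega)]
    rw [if_neg (show ¬ n < 1800 by omega)]
    rw [if_neg (show ¬ n < 2000 by omega)]
    rw [if_neg (show ¬ n < 4000 by omega)]
    rw [if_neg (show ¬ n < 5000 by omega)]
    rw [if_pos (show n < 5200 by omega)]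
    norm_num [sicUppers, sicValues, show Int.toNat 6 = 6 from rfl]
    all_goals omega
  by_cases h8 : n ≤ 5999
  · rw [if_neg (bnd_false n 100 999 (by omega))]
    rw [if_neg (bnd_false n 1000 1499 (by omega))]
    rw [if_neg (bnd_false n 1500 1799 (by omega))]
    rw [if_neg (bnd_false n 1800 1999 (by omega))]
    rw [if_neg (bnd_false n 2000 3999 (by omega))]
    rw [if_neg (bnd_false n 4000 4999 (by omega))]
    rw [if_neg (bnd_false n 5000 5199 (by omega))]
    rw [if_pos (bnd_true n 5200 5999 (by omega))]
    rw [if_neg (show ¬ n < 100 by omega)]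
    rw [if_neg (show ¬ n < 1000 by omega)]
    rw [if_neg (show ¬ n < 1500 by omega)]
    rw [if_neg (show ¬ n < 1800 by omega)]
    rw [if_neg (show ¬ n < 2000 by omega)]
    rw [if_neg (show ¬ n < 4000 by omega)]
    rw [if_neg (show ¬ n < 5000 by omega)]
    rw [if_neg (show ¬ n < 5200 by omega)]
    rw [if_pos (show n < 6000 by omega)]
    norm_num [sicUppers, sicValues, show Int.toNat 7 = 7 from rfl]
    all_goals omega
  by_cases h9 : n ≤ 6799
  · rw [if_neg (bnd_false n 100 999 (by omega))]
    rw [if_neg (bnd_false n 1000 1499 (by omega))]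
    rw [if_neg (bnd_false n 1500 1799 (by omega))]
    rw [if_neg (bnd_false n 1800 1999 (by omega))]
    rw [if_neg (bnd_false n 2000 3999 (by omega))]
    rw [if_neg (bnd_false n 4000 4999 (by omega))]
    rw [if_neg (bnd_false n 5000 5199 (by omega))]
    rw [if_neg (bnd_false n 5200 5999 (by omega))]
    rw [if_pos (bnd_true n 6000 6799 (by omega))]
    rw [if_neg (show ¬ n < 100 by omega)]
    rw [if_neg (show ¬ n < 1000 by omega)]
    rw [if_neg (show ¬ n < 1500 by omega)]
    rw [if_neg (show ¬ n < 1800 by omega)]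
    rw [if_neg (show ¬ n < 2000 by omega)]
    rw [if_neg (show ¬ n < 4000 by omega)]
    rw [if_neg (show ¬ n < 5000 by omega)]
    rw [if_neg (show ¬ n < 5200 by omega)]
    rw [if_neg (show ¬ n < 6000 by omega)]
    rw [if_pos (show n < 7000 by omega)]
    norm_num [sicUppers, sicValues, show Int.toNat 8 = 8 from rfl]
    all_goals omega
  by_cases h10 : n ≤ 6999
  · rw [if_neg (bnd_false n 100 999 (by omega))]
    rw [if_neg (bnd_false n 1000 1499 (by omega))]
    rw [if_neg (bnd_false n 1500 1799 (by omega))]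
    rw [if_neg (bnd_false n 1800 1999 (by omega))]
    rw [if_neg (bnd_false n 2000 3999 (by omega))]
    rw [if_neg (bnd_false n 4000 4999 (by omega))]
    rw [if_neg (bnd_false n 5000 5199 (by omega))]
    rw [if_neg (bnd_false n 5200 5999 (by omega))]
    rw [if_neg (bnd_false n 6000 6799 (by omega))]
    rw [if_neg (bnd_false n 7000 8999 (by omega))]
    rw [if_neg (bnd_false n 9100 9729 (by omega))]
    rw [if_neg (bnd_false n 9900 9999 (by omega))]
    rw [if_neg (show ¬ n < 100 by omega)]
    rw [if_neg (show ¬ n < 1000 by omega)]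
    rw [if_neg (show ¬ n < 1500 by omega)]
    rw [if_neg (show ¬ n < 1800 by omega)]
    rw [if_neg (show ¬ n < 2000 by omega)]
    rw [if_neg (show ¬ n < 4000 by omega)]
    rw [if_neg (show ¬ n < 5000 by omega)]
    rw [if_neg (show ¬ n < 5200 by omega)]
    rw [if_neg (show ¬ n < 6000 by omega)]
    rw [if_pos (show n < 7000 by omega)]
    norm_num [sicUppers, sicValues, show Int.toNat 8 = 8 from rfl]
    all_goals omega
  by_cases h11 : n ≤ 8999
  · rw [if_neg (bnd_false n 100 999 (by omega))]
    rw [if_neg (bnd_false n 1000 1499 (by omega))]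
    rw [if_neg (bnd_false n 1500 1799 (by omega))]
    rw [if_neg (bnd_false n 1800 1999 (by omega))]
    rw [if_neg (bnd_false n 2000 3999 (by omega))]
    rw [if_neg (bnd_false n 4000 4999 (by omega))]
    rw [if_neg (bnd_false n 5000 5199 (by omega))]
    rw [if_neg (bnd_false n 5200 5999 (by omega))]
    rw [if_neg (bnd_false n 6000 6799 (by omega))]
    rw [if_pos (bnd_true n 7000 8999 (by omega))]
    rw [if_neg (show ¬ n < 100 by omega)]
    rw [if_neg (show ¬ n < 1000 by omega)]
    rw [if_neg (show ¬ n < 1500 by omega)]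
    rw [if_neg (show ¬ n < 1800 by omega)]
    rw [if_neg (show ¬ n < 2000 by omega)]
    rw [if_neg (show ¬ n < 4000 by omega)]
    rw [if_neg (show ¬ n < 5000 by omega)]
    rw [if_neg (show ¬ n < 5200 by omega)]
    rw [if_neg (show ¬ n < 6000 by omega)]
    rw [if_neg (show ¬ n < 7000 by omega)]
    rw [if_pos (show n < 9100 by omega)]
    norm_num [sicUppers, sicValues, show Int.toNat 9 = 9 from rfl]
    all_goals omega
  by_cases h12 : n ≤ 9099
  · rw [if_neg (bnd_false n 100 999 (by omega))]
    rw [if_neg (bnd_false n 1000 1499 (by omega))]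
    rw [if_neg (bnd_false n 1500 1799 (by omega))]
    rw [if_neg (bnd_false n 1800 1999 (by omega))]
    rw [if_neg (bnd_false n 2000 3999 (by omega))]
    rw [if_neg (bnd_false n 4000 4999 (by omega))]
    rw [if_neg (bnd_false n 5000 5199 (by omega))]
    rw [if_neg (bnd_false n 5200 5999 (by omega))]
    rw [if_neg (bnd_false n 6000 6799 (by omega))]
    rw [if_neg (bnd_false n 7000 8999 (by omega))]
    rw [if_neg (bnd_false n 9100 9729 (by omega))]
    rw [if_neg (bnd_false n 9900 9999 (by omega))]
    rw [if_neg (show ¬ n < 100 by omega)]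
    rw [if_neg (show ¬ n < 1000 by omega)]
    rw [if_neg (show ¬ n < 1500 by omega)]
    rw [if_neg (show ¬ n < 1800 by omega)]
    rw [if_neg (show ¬ n < 2000 by omega)]
    rw [if_neg (show ¬ n < 4000 by omega)]
    rw [if_neg (show ¬ n < 5000 by omega)]
    rw [if_neg (show ¬ n < 5200 by omega)]
    rw [if_neg (show ¬ n < 6000 by omega)]
    rw [if_neg (show ¬ n < 7000 by omega)]
    rw [if_pos (show n < 9100 by omega)]
    norm_num [sicUppers, sicValues, show Int.toNat 9 = 9 from rfl]
    all_goals omega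
  by_cases h13 : n ≤ 9729
  · rw [if_neg (bnd_false n 100 999 (by omega))]
    rw [if_neg (bnd_false n 1000 1499 (by omega))]
    rw [if_neg (bnd_false n 1500 1799 (by omega))]
    rw [if_neg (bnd_false n 1800 1999 (by omega))]
    rw [if_neg (bnd_false n 2000 3999 (by omega))]
    rw [if_neg (bnd_false n 4000 4999 (by omega))]
    rw [if_neg (bnd_false n 5000 5199 (by omega))]
    rw [if_neg (bnd_false n 5200 5999 (by omega))]
    rw [if_neg (bnd_false n 6000 6799 (by omega))]
    rw [if_neg (bnd_false n 7000 8999 (by omega))]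
    rw [if_pos (bnd_true n 9100 9729 (by omega))]
    rw [if_neg (show ¬ n < 100 by omega)]
    rw [if_neg (show ¬ n < 1000 by omega)]
    rw [if_neg (show ¬ n < 1500 by omega)]
    rw [if_neg (show ¬ n < 1800 by omega)]
    rw [if_neg (show ¬ n < 2000 by omega)]
    rw [if_neg (show ¬ n < 4000 by omega)]
    rw [if_neg (show ¬ n < 5000 by omega)]
    rw [if_neg (show ¬ n < 5200 by omega)]
    rw [if_neg (show ¬ n < 6000 by omega)]
    rw [if_neg (show ¬ n < 7000 by omega)]
    rw [if_neg (show ¬ n < 9100 by omega)]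
    rw [if_pos (show n < 9900 by omega)]
    norm_num [sicUppers, sicValues, show Int.toNat 10 = 10 from rfl]
    all_goals omega
  by_cases h14 : n ≤ 9899
  · rw [if_neg (bnd_false n 100 999 (by omega))]
    rw [if_neg (bnd_false n 1000 1499 (by omega))]
    rw [if_neg (bnd_false n 1500 1799 (by omega))]
    rw [if_neg (bnd_false n 1800 1999 (by omega))]
    rw [if_neg (bnd_false n 2000 3999 (by omega))]
    rw [if_neg (bnd_false n 4000 4999 (by omega))]
    rw [if_neg (bnd_false n 5000 5199 (by omega))]
    rw [if_neg (bnd_false n 5200 5999 (by omega))]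
    rw [if_neg (bnd_false n 6000 6799 (by omega))]
    rw [if_neg (bnd_false n 7000 8999 (by omega))]
    rw [if_neg (bnd_false n 9100 9729 (by omega))]
    rw [if_neg (bnd_false n 9900 9999 (by omega))]
    rw [if_neg (show ¬ n < 100 by omega)]
    rw [if_neg (show ¬ n < 1000 by omega)]
    rw [if_neg (show ¬ n < 1500 by omega)]
    rw [if_neg (show ¬ n < 1800 by omega)]
    rw [if_neg (show ¬ n < 2000 by omega)]
    rw [if_neg (show ¬ n < 4000 by omega)]
    rw [if_neg (show ¬ n < 5000 by omega)]
    rw [if_neg (show ¬ n < 5200 by omega)]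
    rw [if_neg (show ¬ n < 6000 by omega)]
    rw [if_neg (show ¬ n < 7000 by omega)]
    rw [if_neg (show ¬ n < 9100 by omega)]
    rw [if_pos (show n < 9900 by omega)]
    norm_num [sicUppers, sicValues, show Int.toNat 10 = 10 from rfl]
    all_goals omega
  by_cases h15 : n ≤ 9999
  · rw [if_neg (bnd_false n 100 999 (by omega))]
    rw [if_neg (bnd_false n 1000 1499 (by omega))]
    rw [if_neg (bnd_false n 1500 1799 (by omega))]
    rw [if_neg (bnd_false n 1800 1999 (by omega))]
    rw [if_neg (bnd_false n 2000 3999 (by omega))]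
    rw [if_neg (bnd_false n 4000 4999 (by omega))]
    rw [if_neg (bnd_false n 5000 5199 (by omega))]
    rw [if_neg (bnd_false n 5200 5999 (by omega))]
    rw [if_neg (bnd_false n 6000 6799 (by omega))]
    rw [if_neg (bnd_false n 7000 8999 (by omega))]
    rw [if_neg (bnd_false n 9100 9729 (by omega))]
    rw [if_pos (bnd_true n 9900 9999 (by omega))]
    rw [if_neg (show ¬ n < 100 by omega)]
    rw [if_neg (show ¬ n < 1000 by omega)]
    rw [if_neg (show ¬ n < 1500 by omega)]
    rw [if_neg (show ¬ n < 1800 by omega)]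
    rw [if_neg (show ¬ n < 2000 by omega)]
    rw [if_neg (show ¬ n < 4000 by omega)]
    rw [if_neg (show ¬ n < 5000 by omega)]
    rw [if_neg (show ¬ n < 5200 by omega)]
    rw [if_neg (show ¬ n < 6000 by omega)]
    rw [if_neg (show ¬ n < 7000 by omega)]
    rw [if_neg (show ¬ n < 9100 by omega)]
    rw [if_neg (show ¬ n < 9900 by omega)]
    norm_num [sicUppers, sicValues, show Int.toNat 11 = 11 from rfl]
  rw [if_neg (bnd_false n 100 999 (by omega))]
  rw [if_neg (bnd_false n 1000 1499 (by omega))]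
  rw [if_neg (bnd_false n 1500 1799 (by omega))]
  rw [if_neg (bnd_false n 1800 1999 (by omega))]
  rw [if_neg (bnd_false n 2000 3999 (by omega))]
  rw [if_neg (bnd_false n 4000 4999 (by omega))]
  rw [if_neg (bnd_false n 5000 5199 (by omega))]
  rw [if_neg (bnd_false n 5200 5999 (by omega))]
  rw [if_neg (bnd_false n 6000 6799 (by omega))]
  rw [if_neg (bnd_false n 7000 8999 (by omega))]
  rw [if_neg (bnd_false n 9100 9729 (by omega))]
  rw [if_neg (bnd_false n 9900 9999 (by omega))]
  rw [if_neg (show ¬ n < 100 by omega)]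
  rw [if_neg (show ¬ n < 1000 by omega)]
  rw [if_neg (show ¬ n < 1500 by omega)]
  rw [if_neg (show ¬ n < 1800 by omega)]
  rw [if_neg (show ¬ n < 2000 by omega)]
  rw [if_neg (show ¬ n < 4000 by omega)]
  rw [if_neg (show ¬ n < 5000 by omega)]
  rw [if_neg (show ¬ n < 5200 by omega)]
  rw [if_neg (show ¬ n < 6000 by omega)]
  rw [if_neg (show ¬ n < 7000 by omega)]
  rw [if_neg (show ¬ n < 9100 by omega)]
  rw [if_neg (show ¬ n < 9900 by omega)]
  norm_num [sicUppers, sicValues, show Int.toNat 11 = 11 from rfl]
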